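-- pv_equiv track=rewrite | github.com/eronekogin/leetcode | 2023/minimum_number_of_operations_to_make_string_sorted.py | makeStringSorted
-- ===== SOURCE A (Python) =====
-- def makeStringSorted(s: str) -> int:
--     cnt = [0] * 26
--     rslt = 0
--     charsOnward = 0
--     combCharsOnWard = 1
--     offset = ord('a')
--     for c in reversed(s):
--         i = ord(c) - offset
--         cnt[i] += 1
--         charsOnward += 1
--         combCharsOnWard = combCharsOnWard * charsOnward // cnt[i]
--         rslt += combCharsOnWard * sum(cnt[:i]) // charsOnward
--
--     return rslt % (10 ** 9 + 7)
-- ===== SOURCE B (Python) =====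
-- def makeStringSorted(s: str) -> int:
--     n = len(s)
--     fact = [1] * (n + 1)
--     for k in range(1, n + 1):
--         fact[k] = fact[k - 1] * k
--     cnt = [0] * 26
--     for c in s:
--         cnt[ord(c) - 97] += 1
--     denom = 1
--     for x in cnt:
--         denom *= fact[x]
--     rank = 0
--     rem = n
--     for c in s:
--         i = ord(c) - 97
--         rank += sum(cnt[:i]) * fact[rem - 1] // denom
--         denom //= fact[cnt[i]]
--         cnt[i] -= 1
--         denom *= fact[cnt[i]]
--         rem -= 1
--     return rank % (10 ** 9 + 7)
-- ===== Notes on version B (the rewrite author's own statement) =====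
-- stated objective: alternative
-- what changed: A makes one backward pass maintaining the multinomial coefficient of the suffix incrementally by exact floor divisions; B precomputes a factorial table and the full character counts, then makes one forward pass computing each position's contribution as sum(cnt[:i]) * (rem-1)! // (product of count factorials), maintaining that denominator as counts decrease.
import Mathlib
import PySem

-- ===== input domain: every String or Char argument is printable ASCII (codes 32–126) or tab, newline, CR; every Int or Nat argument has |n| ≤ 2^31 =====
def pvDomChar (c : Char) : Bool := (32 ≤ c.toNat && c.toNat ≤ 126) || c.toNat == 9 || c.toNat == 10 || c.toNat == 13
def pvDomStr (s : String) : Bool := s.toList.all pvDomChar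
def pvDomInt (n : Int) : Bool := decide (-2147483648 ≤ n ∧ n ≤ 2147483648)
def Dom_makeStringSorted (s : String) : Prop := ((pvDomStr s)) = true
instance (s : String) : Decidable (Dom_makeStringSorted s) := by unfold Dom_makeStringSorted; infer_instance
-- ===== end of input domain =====

-- B replaces A's backward pass (incremental multinomial by exact floor divisions) by a forward pass
-- over a precomputed factorial table with a maintained denominator of count factorials; exact
-- integers throughout, so the return value is identical; objective: alternative (not faster).

-- ===== PORT A =====
def makeStringSorted (s : String) : Int :=
  let init : List Int × Int × Int × Int := (List.replicate 26 0, 0, 0, 1)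
  let st := s.toList.reverse.foldl (fun st c =>
    let cnt := st.1
    let rslt := st.2.1
    let charsOnward := st.2.2.1
    let combCharsOnWard := st.2.2.2
    let i : Int := (c.toNat : Int) - 97
    let cnt := PySem.List.pySetD cnt i (PySem.List.pyGetD cnt i 0 + 1)
    let charsOnward := charsOnward + 1
    let combCharsOnWard := PySem.Int.floordiv (combCharsOnWard * charsOnward) (PySem.List.pyGetD cnt i 0)
    let rslt := rslt + PySem.Int.floordiv (combCharsOnWard * (PySem.List.slice cnt none (some i)).sum) charsOnward
    (cnt, rslt, charsOnward, combCharsOnWard)) init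
  PySem.Int.mod st.2.1 (10 ^ 9 + 7)

-- ===== PORT B =====
def makeStringSorted_alt (s : String) : Int :=
  let n : Int := (s.toList.length : Int)
  let fact : List Int := (PySem.List.pyRange 1 (n + 1) 1).foldl
    (fun f k => PySem.List.pySetD f k (PySem.List.pyGetD f (k - 1) 0 * k))
    (List.replicate (s.toList.length + 1) (1 : Int))
  let cnt : List Int := s.toList.foldl (fun cnt c =>
      PySem.List.pySetD cnt ((c.toNat : Int) - 97) (PySem.List.pyGetD cnt ((c.toNat : Int) - 97) 0 + 1))
    (List.replicate 26 (0 : Int))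
  let denom : Int := cnt.foldl (fun d x => d * PySem.List.pyGetD fact x 0) 1
  let st := s.toList.foldl (fun (st : Int × List Int × Int × Int) c =>
    let rank := st.1
    let cnt := st.2.1
    let denom := st.2.2.1
    let rem := st.2.2.2
    let i : Int := (c.toNat : Int) - 97
    let rank := rank + PySem.Int.floordiv ((PySem.List.slice cnt none (some i)).sum * PySem.List.pyGetD fact (rem - 1) 0) denom
    let denom := PySem.Int.floordiv denom (PySem.List.pyGetD fact (PySem.List.pyGetD cnt i 0) 0)
    let cnt := PySem.List.pySetD cnt i (PySem.List.pyGetD cnt i 0 - 1)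
    let denom := denom * PySem.List.pyGetD fact (PySem.List.pyGetD cnt i 0) 0
    let rem := rem - 1
    (rank, cnt, denom, rem)) (0, cnt, denom, n)
  PySem.Int.mod st.1 (10 ^ 9 + 7)

-- ===== PRECONDITION & SPEC =====
-- Pre_ excludes exactly the strings containing a character outside code points 71..122 ('G'..'z'):
-- on those BOTH programs raise IndexError at cnt[ord(c)-97] (a list of length 26).
def Pre_makeStringSorted (s : String) : Prop :=
  s.toList.all (fun c => 71 ≤ c.toNat && c.toNat ≤ 122) = true
instance (s : String) : Decidable (Pre_makeStringSorted s) := by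
  unfold Pre_makeStringSorted; infer_instance
def pvWitness_makeStringSorted : String := "cbaz"
def Spec_makeStringSorted (s : String) (out : Int) : Prop := out = makeStringSorted_alt s
instance (s : String) (out : Int) : Decidable (Spec_makeStringSorted s out) := by
  unfold Spec_makeStringSorted; infer_instance

-- ===== CLAIM (what is proved, stated in full; the proofs are below) =====
def Claim_equal_makeStringSorted : Prop :=
  ∀ (s : String), Dom_makeStringSorted s → Pre_makeStringSorted s →
    Spec_makeStringSorted s (makeStringSorted s)

-- ===== LEMMAS AND PROOFS =====

-- the modulus
def pvP : ℕ := 1000000007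

-- slot of a character: the index of the 26-cell counter that cnt[ord(c)-97] touches
-- (Python wraps a negative index: codes 71..96 land on cells 0..25 from the end).
def slotC (c : Char) : ℕ := if 97 ≤ c.toNat then c.toNat - 97 else c.toNat - 71

def slots (cs : List Char) : List ℕ := cs.map slotC

-- counter list (26 cells) of a slot list
def cntN (l : List ℕ) : List ℕ := (List.range 26).map fun j => l.count j

def cntI (f : List ℕ) : List Int := f.map (Nat.cast)

def denomF (f : List ℕ) : ℕ := (f.map Nat.factorial).prod

def mlt (f : List ℕ) : ℕ := (f.sum).factorial / denomF f

def wsum (f : List ℕ) (k : ℕ) : ℕ :=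
  ((List.range k).map fun j =>
    if f.getD j 0 = 0 then 0 else mlt (f.set j (f.getD j 0 - 1))).sum

-- exact rank of a slot list among its sorted permutations
def erank : List ℕ → ℕ
  | [] => 0
  | x :: l => wsum (cntN (x :: l)) x + erank l

theorem slotC_lt (c : Char) (h1 : 71 ≤ c.toNat) (h2 : c.toNat ≤ 122) : slotC c < 26 := by
  unfold slotC; split <;> omega

theorem denomF_cons (x : ℕ) (f : List ℕ) : denomF (x :: f) = x.factorial * denomF f := by
  simp [denomF]

theorem denomF_pos (f : List ℕ) : 0 < denomF f := by
  induction f with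
  | nil => simp [denomF]
  | cons x f ih => rw [denomF_cons]; exact Nat.mul_pos x.factorial_pos ih

theorem denomF_dvd (f : List ℕ) : denomF f ∣ (f.sum).factorial := by
  induction f with
  | nil => simp [denomF]
  | cons x f ih =>
    rw [denomF_cons, List.sum_cons]
    exact dvd_trans (mul_dvd_mul_left _ ih) (Nat.factorial_mul_factorial_dvd_factorial_add x f.sum)

theorem mlt_spec (f : List ℕ) : mlt f * denomF f = (f.sum).factorial := by
  unfold mlt
  exact Nat.div_mul_cancel (denomF_dvd f)

theorem sum_set_add (f : List ℕ) (j : ℕ) (v : ℕ) (hj : j < f.length) :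
    (f.set j v).sum + f.getD j 0 = f.sum + v := by
  induction f generalizing j with
  | nil => simp at hj
  | cons x f ih =>
    cases j with
    | zero => simp [List.set]; omega
    | succ j =>
      have := ih j (by simpa using hj)
      simp [List.set, List.getD] at this ⊢
      omega

theorem denomF_set (f : List ℕ) (j : ℕ) (v : ℕ) (hj : j < f.length) :
    denomF (f.set j v) * (f.getD j 0).factorial = denomF f * v.factorial := by
  induction f generalizing j with
  | nil => simp at hj
  | cons x f ih =>
    cases j with
    | zero => simp [List.set, denomF_cons, List.getD]; ring
    | succ j =>
      have h := ih j (by simpa using hj)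
      simp only [List.set_cons_succ, denomF_cons, List.getD_cons_succ]
      rw [mul_assoc, h, mul_assoc]

-- decrement: c = f[j] ≥ 1; f' = f with cell j lowered by one
theorem denomF_set_pred (f : List ℕ) (j : ℕ) (hj : j < f.length) (hc : 1 ≤ f.getD j 0) :
    denomF f = f.getD j 0 * denomF (f.set j (f.getD j 0 - 1)) := by
  have h := denomF_set f j (f.getD j 0 - 1) hj
  have hfac : (f.getD j 0).factorial = f.getD j 0 * (f.getD j 0 - 1).factorial := by
    conv_lhs => rw [show f.getD j 0 = (f.getD j 0 - 1) + 1 by omega]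
    rw [Nat.factorial_succ]
    congr 1
    omega
  rw [hfac] at h
  have hpos : 0 < (f.getD j 0 - 1).factorial := Nat.factorial_pos _
  nlinarith [h]

theorem sum_set_pred (f : List ℕ) (j : ℕ) (hj : j < f.length) (hc : 1 ≤ f.getD j 0) :
    (f.set j (f.getD j 0 - 1)).sum + 1 = f.sum := by
  have := sum_set_add f j (f.getD j 0 - 1) hj
  omega

-- key per-cell identity: c * (m-1)! = denomF f * mlt (f minus one at cell j)
theorem cell_fac (f : List ℕ) (j : ℕ) (hj : j < f.length) (hc : 1 ≤ f.getD j 0) :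
    f.getD j 0 * ((f.sum - 1).factorial) =
      denomF f * mlt (f.set j (f.getD j 0 - 1)) := by
  have hsum := sum_set_pred f j hj hc
  have hden := denomF_set_pred f j hj hc
  have hm := mlt_spec (f.set j (f.getD j 0 - 1))
  have : (f.set j (f.getD j 0 - 1)).sum = f.sum - 1 := by omega
  rw [this] at hm
  calc f.getD j 0 * (f.sum - 1).factorial
      = f.getD j 0 * (mlt (f.set j (f.getD j 0 - 1)) * denomF (f.set j (f.getD j 0 - 1))) := by rw [hm]
    _ = (f.getD j 0 * denomF (f.set j (f.getD j 0 - 1))) * mlt (f.set j (f.getD j 0 - 1)) := by ring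
    _ = denomF f * mlt (f.set j (f.getD j 0 - 1)) := by rw [← hden]

-- key per-cell identity: mlt f * c = m * mlt (f minus one at cell j)
theorem cell_mlt (f : List ℕ) (j : ℕ) (hj : j < f.length) (hc : 1 ≤ f.getD j 0) :
    mlt f * f.getD j 0 = f.sum * mlt (f.set j (f.getD j 0 - 1)) := by
  have hden := denomF_set_pred f j hj hc
  have hm := mlt_spec f
  have hcell := cell_fac f j hj hc
  have hsum1 : 1 ≤ f.sum := by
    have := sum_set_pred f j hj hc
    omega
  have hfac : (f.sum).factorial = f.sum * (f.sum - 1).factorial := by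
    conv_lhs => rw [show f.sum = (f.sum - 1) + 1 by omega]
    rw [Nat.factorial_succ]
    congr 1
    omega
  have key : mlt f * f.getD j 0 * ((f.sum - 1).factorial * denomF (f.set j (f.getD j 0 - 1)))
      = f.sum * mlt (f.set j (f.getD j 0 - 1)) * ((f.sum - 1).factorial * denomF (f.set j (f.getD j 0 - 1))) := by
    calc mlt f * f.getD j 0 * ((f.sum - 1).factorial * denomF (f.set j (f.getD j 0 - 1)))
        = mlt f * (f.getD j 0 * (f.sum - 1).factorial) * denomF (f.set j (f.getD j 0 - 1)) := by ring
      _ = mlt f * (denomF f * mlt (f.set j (f.getD j 0 - 1))) * denomF (f.set j (f.getD j 0 - 1)) := by rw [hcell]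
      _ = (mlt f * denomF f) * (mlt (f.set j (f.getD j 0 - 1)) * denomF (f.set j (f.getD j 0 - 1))) := by ring
      _ = (f.sum * (f.sum - 1).factorial) * (mlt (f.set j (f.getD j 0 - 1)) * denomF (f.set j (f.getD j 0 - 1))) := by
            rw [hm, hfac]
      _ = f.sum * mlt (f.set j (f.getD j 0 - 1)) * ((f.sum - 1).factorial * denomF (f.set j (f.getD j 0 - 1))) := by ring
  have hpos : 0 < (f.sum - 1).factorial * denomF (f.set j (f.getD j 0 - 1)) :=
    Nat.mul_pos (Nat.factorial_pos _) (denomF_pos _)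
  exact Nat.eq_of_mul_eq_mul_right hpos key

theorem take_succ_sum (f : List ℕ) (k : ℕ) :
    (f.take (k+1)).sum = (f.take k).sum + f.getD k 0 := by
  induction f generalizing k with
  | nil => simp
  | cons x f ih =>
    cases k with
    | zero => simp
    | succ k =>
      simp only [List.take_succ_cons, List.sum_cons, List.getD_cons_succ, ih k]
      omega

-- S * (m-1)! = denomF f * wsum f k   (B's division is exact)
theorem sless_fac (f : List ℕ) (k : ℕ) :
    (f.take k).sum * (f.sum - 1).factorial = denomF f * wsum f k := by
  induction k with
  | zero => simp [wsum]
  | succ k ih =>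
    rw [take_succ_sum, wsum, List.range_succ, List.map_append, List.sum_append,
        Nat.add_mul, ih]
    simp only [List.map_cons, List.map_nil, List.sum_cons, List.sum_nil, Nat.add_zero]
    rw [Nat.mul_add]
    congr 1
    by_cases h0 : f.getD k 0 = 0
    · rw [if_pos h0, h0]; simp
    · rw [if_neg h0]
      by_cases hk : k < f.length
      · exact cell_fac f k hk (by omega)
      · exact absurd (List.getD_eq_default _ _ (by omega)) h0

-- mlt f * S = m * wsum f k   (A's division is exact)
theorem mlt_sless (f : List ℕ) (k : ℕ) :
    mlt f * (f.take k).sum = f.sum * wsum f k := by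
  induction k with
  | zero => simp [wsum]
  | succ k ih =>
    rw [take_succ_sum, wsum, List.range_succ, List.map_append, List.sum_append,
        Nat.mul_add, ih]
    simp only [List.map_cons, List.map_nil, List.sum_cons, List.sum_nil, Nat.add_zero]
    rw [Nat.mul_add]
    congr 1
    by_cases h0 : f.getD k 0 = 0
    · rw [if_pos h0, h0]; simp
    · rw [if_neg h0]
      by_cases hk : k < f.length
      · exact cell_mlt f k hk (by omega)
      · exact absurd (List.getD_eq_default _ _ (by omega)) h0

theorem map_range_set {α : Type} (g : ℕ → α) (n x : ℕ) (v : α) :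
    ((List.range n).map g).set x v = (List.range n).map (fun j => if j = x then v else g j) := by
  apply List.ext_getElem
  · simp
  · intro i h1 h2
    simp only [List.getElem_set, List.getElem_map, List.getElem_range] at *
    rcases eq_or_ne x i with h | h
    · simp [h]
    · simp [h, h.symm]

theorem cntN_length (l : List ℕ) : (cntN l).length = 26 := by simp [cntN]

theorem cntN_getD (l : List ℕ) (j : ℕ) (hj : j < 26) : (cntN l).getD j 0 = l.count j := by
  rw [List.getD_eq_getElem _ _ (by simp [cntN_length, hj] )]
  simp [cntN]

theorem cntN_cons (l : List ℕ) (x : ℕ) :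
    cntN (x :: l) = (cntN l).set x (l.count x + 1) := by
  rw [cntN, cntN, map_range_set]
  congr 1
  funext j
  by_cases h : j = x
  · subst h; simp
  · simp [h, Ne.symm h]

theorem cntN_sum (l : List ℕ) (h : ∀ y ∈ l, y < 26) : (cntN l).sum = l.length := by
  induction l with
  | nil => simp [cntN]
  | cons x l ih =>
    have hx : x < 26 := h x (by simp)
    rw [cntN_cons l x]
    have h2 := sum_set_add (cntN l) x (l.count x + 1) (by rw [cntN_length]; exact hx)
    rw [cntN_getD l x hx] at h2
    have := ih (fun y hy => h y (by simp [hy]))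
    simp only [List.length_cons]
    omega

theorem bridge_get (cnt : List Int) (c : Char) (d : Int) (hlen : cnt.length = 26)
    (h1 : 71 ≤ c.toNat) (h2 : c.toNat ≤ 122) :
    PySem.List.pyGetD cnt ((c.toNat : Int) - 97) d = cnt.getD (slotC c) d := by
  by_cases h : 97 ≤ c.toNat
  · have : ((c.toNat : Int) - 97) = ((c.toNat - 97 : ℕ) : Int) := by omega
    rw [this, PySem.List.pyGetD_natCast]
    simp [slotC, h]
  · have hk : ((c.toNat : Int) - 97) = -((97 - c.toNat : ℕ) : Int) := by omega
    rw [hk, PySem.List.pyGetD_neg_natCast _ _ _ (by omega) (by omega)]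
    rw [List.getD_eq_getElem _ _ (by simp [slotC, h]; omega)]
    congr 1
    simp [slotC, h]; omega

theorem bridge_set (cnt : List Int) (c : Char) (v : Int) (hlen : cnt.length = 26)
    (h1 : 71 ≤ c.toNat) (h2 : c.toNat ≤ 122) :
    PySem.List.pySetD cnt ((c.toNat : Int) - 97) v = cnt.set (slotC c) v := by
  by_cases h : 97 ≤ c.toNat
  · have : ((c.toNat : Int) - 97) = ((c.toNat - 97 : ℕ) : Int) := by omega
    rw [this, PySem.List.pySetD_natCast]
    simp [slotC, h]
  · have hk : ((c.toNat : Int) - 97) = -((97 - c.toNat : ℕ) : Int) := by omega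
    rw [hk]
    have hs : PySem.List.pySetD cnt (-((97 - c.toNat : ℕ) : Int)) v
        = cnt.set (cnt.length - (97 - c.toNat)) v := by
      simp [PySem.List.pySetD, PySem.List.pySet?, PySem.List.pyIdx?]
      rw [if_neg (by omega), if_pos (by omega)]
      simp
    rw [hs, hlen]
    congr 1
    simp [slotC, h]; omega

theorem bridge_slice (cnt : List Int) (c : Char) (hlen : cnt.length = 26)
    (h1 : 71 ≤ c.toNat) (h2 : c.toNat ≤ 122) :
    PySem.List.slice cnt none (some ((c.toNat : Int) - 97)) = cnt.take (slotC c) := by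
  by_cases h : 97 ≤ c.toNat
  · have : ((c.toNat : Int) - 97) = ((c.toNat - 97 : ℕ) : Int) := by omega
    rw [this, PySem.List.slice_to_natCast]
    simp [slotC, h]
  · have hk : ((c.toNat : Int) - 97) = -((97 - c.toNat : ℕ) : Int) := by omega
    rw [hk, PySem.List.slice_to_neg_natCast _ _ (by omega)]
    rw [hlen]
    congr 1
    simp [slotC, h]; omega

theorem set_getD_self (l : List ℕ) (n : ℕ) (h : n < l.length) : l.set n (l.getD n 0) = l := by
  apply List.ext_getElem
  · simp
  · intro i h1 h2
    rw [List.getElem_set]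
    split
    · rename_i he; subst he; rw [List.getD_eq_getElem _ _ h]
    · rfl

theorem cntI_length (f : List ℕ) : (cntI f).length = f.length := by simp [cntI]

theorem cntI_getD (f : List ℕ) (j : ℕ) : (cntI f).getD j 0 = ((f.getD j 0 : ℕ) : Int) := by
  simp only [cntI, List.getD_eq_getElem?_getD, List.getElem?_map]
  cases f[j]? <;> simp

theorem cntI_set (f : List ℕ) (j : ℕ) (v : ℕ) :
    cntI (f.set j v) = (cntI f).set j ((v : ℕ) : Int) := by
  simp [cntI, List.map_set]

theorem cntI_take_sum (f : List ℕ) (k : ℕ) :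
    ((cntI f).take k).sum = (((f.take k).sum : ℕ) : Int) := by
  rw [cntI, ← List.map_take, Nat.cast_list_sum]

theorem map_range_getD {α : Type} (g : ℕ → α) (n j : ℕ) (d : α) (hj : j < n) :
    ((List.range n).map g).getD j d = g j := by
  rw [List.getD_eq_getElem _ _ (by simpa using hj)]
  simp

theorem getD_set_self (f : List ℕ) (j v : ℕ) (hj : j < f.length) :
    (f.set j v).getD j 0 = v := by
  rw [List.getD_eq_getElem _ _ (by simpa using hj)]
  simp

def initA : List Int × Int × Int × Int := (List.replicate 26 0, 0, 0, 1)

def stepA (st : List Int × Int × Int × Int) (c : Char) : List Int × Int × Int × Int :=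
  let cnt := st.1
  let rslt := st.2.1
  let charsOnward := st.2.2.1
  let combCharsOnWard := st.2.2.2
  let i : Int := (c.toNat : Int) - 97
  let cnt := PySem.List.pySetD cnt i (PySem.List.pyGetD cnt i 0 + 1)
  let charsOnward := charsOnward + 1
  let combCharsOnWard := PySem.Int.floordiv (combCharsOnWard * charsOnward) (PySem.List.pyGetD cnt i 0)
  let rslt := rslt + PySem.Int.floordiv (combCharsOnWard * (PySem.List.slice cnt none (some i)).sum) charsOnward
  (cnt, rslt, charsOnward, combCharsOnWard)

theorem makeStringSorted_eq (s : String) :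
    makeStringSorted s = PySem.Int.mod (s.toList.reverse.foldl stepA initA).2.1 (10 ^ 9 + 7) := rfl

theorem slots_cons (x : Char) (t : List Char) : slots (x :: t) = slotC x :: slots t := rfl

theorem cntN_slots_cons (x : Char) (t : List Char) (h1 : 71 ≤ x.toNat) (h2 : x.toNat ≤ 122) :
    cntN (slots (x :: t)) = (cntN (slots t)).set (slotC x)
      ((cntN (slots t)).getD (slotC x) 0 + 1) := by
  rw [slots_cons, cntN_cons, cntN_getD _ _ (slotC_lt x h1 h2)]

theorem A_inv (cs : List Char) (hb : ∀ c ∈ cs, 71 ≤ c.toNat ∧ c.toNat ≤ 122) :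
    cs.reverse.foldl stepA initA =
      (cntI (cntN (slots cs)), ((erank (slots cs) : ℕ) : Int),
        ((cs.length : ℕ) : Int), ((mlt (cntN (slots cs)) : ℕ) : Int)) := by
  induction cs with
  | nil => decide
  | cons x t ih =>
    obtain ⟨hx1, hx2⟩ := hb x (by simp)
    have hbt : ∀ c ∈ t, 71 ≤ c.toNat ∧ c.toNat ≤ 122 := fun c hc => hb c (by simp [hc])
    have hσ : slotC x < 26 := slotC_lt x hx1 hx2
    have hslotsb : ∀ y ∈ slots (x :: t), y < 26 := by
      intro y hy
      rw [slots] at hy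
      obtain ⟨c, hc, rfl⟩ := List.mem_map.mp hy
      obtain ⟨g1, g2⟩ := hb c hc
      exact slotC_lt c g1 g2
    set f := cntN (slots t) with hf
    set g := cntN (slots (x :: t)) with hg
    have hflen : f.length = 26 := cntN_length _
    have hglen : g.length = 26 := cntN_length _
    have hcons : g = f.set (slotC x) (f.getD (slotC x) 0 + 1) := cntN_slots_cons x t hx1 hx2
    have hgget : g.getD (slotC x) 0 = f.getD (slotC x) 0 + 1 := by
      rw [hcons]; exact getD_set_self f _ _ (by omega)
    have hgsum : g.sum = t.length + 1 := by
      have h5 := cntN_sum (slots (x :: t)) hslotsb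
      rw [← hg] at h5
      simp [slots] at h5
      omega
    have hset_back : g.set (slotC x) (g.getD (slotC x) 0 - 1) = f := by
      rw [hgget, hcons, List.set_set]
      simpa using set_getD_self f (slotC x) (by omega)
    rw [List.reverse_cons, List.foldl_append, ih hbt]
    simp only [stepA, List.foldl_cons, List.foldl_nil]
    have hclen : (cntI f).length = 26 := by rw [cntI_length, hflen]
    have e1 : PySem.List.pyGetD (cntI f) ((x.toNat : Int) - 97) 0 = ((f.getD (slotC x) 0 : ℕ) : Int) := by
      rw [bridge_get _ _ _ hclen hx1 hx2, cntI_getD]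
    have e2 : PySem.List.pySetD (cntI f) ((x.toNat : Int) - 97) (((f.getD (slotC x) 0 : ℕ) : Int) + 1) = cntI g := by
      rw [bridge_set _ _ _ hclen hx1 hx2, hcons, cntI_set]
      push_cast
      rfl
    rw [e1, e2]
    have hgc1 : 1 ≤ g.getD (slotC x) 0 := by omega
    have e3 : PySem.List.pyGetD (cntI g) ((x.toNat : Int) - 97) 0 = ((g.getD (slotC x) 0 : ℕ) : Int) := by
      rw [bridge_get _ _ _ (by rw [cntI_length, hglen]) hx1 hx2, cntI_getD]
    rw [e3]
    have hm1 : ((t.length : ℕ) : Int) + 1 = (((t.length + 1 : ℕ)) : Int) := by push_cast; ring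
    have hcm := cell_mlt g (slotC x) (by omega) hgc1
    rw [hset_back, hgsum] at hcm
    have hdiv1 : (mlt f * (t.length + 1)) / g.getD (slotC x) 0 = mlt g := by
      rw [mul_comm, ← hcm]
      exact Nat.mul_div_cancel _ (by omega)
    have e4 : PySem.Int.floordiv (((mlt f : ℕ) : Int) * (((t.length : ℕ) : Int) + 1)) ((g.getD (slotC x) 0 : ℕ) : Int)
        = ((mlt g : ℕ) : Int) := by
      rw [hm1, show ((mlt f : ℕ) : Int) * (((t.length + 1 : ℕ)) : Int) = (((mlt f * (t.length + 1) : ℕ)) : Int) by push_cast; ring,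
         PySem.Int.floordiv_natCast, hdiv1]
    rw [e4]
    have e5 : PySem.List.slice (cntI g) none (some ((x.toNat : Int) - 97)) = (cntI g).take (slotC x) :=
      bridge_slice _ _ (by rw [cntI_length, hglen]) hx1 hx2
    rw [e5, cntI_take_sum]
    have hms := mlt_sless g (slotC x)
    rw [hgsum] at hms
    have hdiv2 : (mlt g * (g.take (slotC x)).sum) / (t.length + 1) = wsum g (slotC x) := by
      rw [hms]
      exact Nat.mul_div_cancel_left _ (by omega)
    have e6 : PySem.Int.floordiv (((mlt g : ℕ) : Int) * (((g.take (slotC x)).sum : ℕ) : Int)) (((t.length : ℕ) : Int) + 1)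
        = ((wsum g (slotC x) : ℕ) : Int) := by
      rw [hm1, show ((mlt g : ℕ) : Int) * (((g.take (slotC x)).sum : ℕ) : Int) = (((mlt g * (g.take (slotC x)).sum : ℕ)) : Int) by push_cast; ring,
         PySem.Int.floordiv_natCast, hdiv2]
    rw [e6]
    have e7 : ((erank (slots t) : ℕ) : Int) + ((wsum g (slotC x) : ℕ) : Int) = ((erank (slots (x :: t)) : ℕ) : Int) := by
      have h9 : erank (slots (x :: t)) = wsum (cntN (slots (x :: t))) (slotC x) + erank (slots t) := by
        rw [slots_cons]; rfl
      rw [h9, ← hg]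
      push_cast
      ring
    rw [e7, hm1]
    simp

theorem hMODcast : (10 ^ 9 + 7 : Int) = ((pvP : ℕ) : Int) := by norm_num [pvP]

theorem A_char (s : String) (hb : ∀ c ∈ s.toList, 71 ≤ c.toNat ∧ c.toNat ≤ 122) :
    makeStringSorted s = (((erank (slots s.toList) % pvP : ℕ)) : Int) := by
  rw [makeStringSorted_eq, A_inv s.toList hb]
  show PySem.Int.mod ((erank (slots s.toList) : ℕ) : Int) (10 ^ 9 + 7) = _
  rw [hMODcast, PySem.Int.mod_natCast]

-- ===== B-side lemmas =====

-- the factorial table Source B builds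
def factTbl (n : ℕ) : List Int :=
  (PySem.List.pyRange 1 ((n : Int) + 1) 1).foldl
    (fun f k => PySem.List.pySetD f k (PySem.List.pyGetD f (k - 1) 0 * k))
    (List.replicate (n + 1) (1 : Int))

theorem factTbl_loop (n m : ℕ) (h2 : m ≤ n) :
    (PySem.List.pyRange 1 ((m : Int) + 1) 1).foldl
      (fun f k => PySem.List.pySetD f k (PySem.List.pyGetD f (k - 1) 0 * k))
      (List.replicate (n + 1) (1 : Int))
    = (List.range (n + 1)).map (fun j => if j ≤ m then ((j.factorial : ℕ) : Int) else 1) := by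
  induction m with
  | zero =>
    have h0 : PySem.List.pyRange 1 (((0 : ℕ) : Int) + 1) 1 = [] :=
      PySem.List.pyRange_one_eq_nil (by norm_num)
    rw [h0]
    simp only [List.foldl_nil]
    apply List.ext_getElem
    · simp
    · intro i h1' h2'
      simp only [List.getElem_replicate, List.getElem_map, List.getElem_range]
      match i with
      | 0 => simp [Nat.factorial]
      | (j+1) => simp
  | succ m ih =>
    have hrange : PySem.List.pyRange 1 (((m+1 : ℕ) : Int) + 1) 1
        = PySem.List.pyRange 1 ((m : Int) + 1) 1 ++ [((m : Int) + 1)] := by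
      have h := PySem.List.pyRange_one_succ_right (a := 1) (b := (m : Int) + 1) (by omega)
      rw [← h]
      norm_cast
    rw [hrange, List.foldl_append, ih (by omega)]
    simp only [List.foldl_cons, List.foldl_nil]
    have hget : PySem.List.pyGetD ((List.range (n + 1)).map (fun j => if j ≤ m then ((j.factorial : ℕ) : Int) else 1)) (((m : Int) + 1) - 1) 0
        = ((m.factorial : ℕ) : Int) := by
      rw [show ((m : Int) + 1 - 1) = ((m : ℕ) : Int) by ring,
          PySem.List.pyGetD_natCast, map_range_getD _ _ _ _ (by omega), if_pos le_rfl]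
    rw [hget,
        show ((m.factorial : ℕ) : Int) * ((m : Int) + 1) = (((m+1).factorial : ℕ) : Int) by
          rw [Nat.factorial_succ]; push_cast; ring,
        show ((m : Int) + 1) = ((m+1 : ℕ) : Int) by push_cast; ring,
        PySem.List.pySetD_natCast, map_range_set]
    congr 1
    funext j
    by_cases hj1 : j = m + 1
    · subst hj1; simp
    · by_cases hj2 : j ≤ m
      · rw [if_neg hj1, if_pos hj2, if_pos (by omega)]
      · rw [if_neg hj1, if_neg hj2, if_neg (by omega)]

theorem factTbl_getD (n k : ℕ) (hk : k ≤ n) :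
    PySem.List.pyGetD (factTbl n) ((k : ℕ) : Int) 0 = ((k.factorial : ℕ) : Int) := by
  rw [factTbl, factTbl_loop n n le_rfl, PySem.List.pyGetD_natCast,
      map_range_getD _ _ _ _ (by omega), if_pos hk]

-- the count-building step shared with A's analysis
def stepCnt (cnt : List Int) (c : Char) : List Int :=
  PySem.List.pySetD cnt ((c.toNat : Int) - 97) (PySem.List.pyGetD cnt ((c.toNat : Int) - 97) 0 + 1)

theorem cntN_eq_of_count (l1 l2 : List ℕ) (h : ∀ j, l1.count j = l2.count j) : cntN l1 = cntN l2 :=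
  List.map_congr_left (fun j _ => h j)

theorem cntFold (cs : List Char) (hb : ∀ c ∈ cs, 71 ≤ c.toNat ∧ c.toNat ≤ 122) :
    ∀ (l : List ℕ), cs.foldl stepCnt (cntI (cntN l)) = cntI (cntN (slots cs ++ l)) := by
  induction cs with
  | nil => intro l; simp [slots]
  | cons x cst ih =>
    intro l
    obtain ⟨hx1, hx2⟩ := hb x (by simp)
    have hσ := slotC_lt x hx1 hx2
    simp only [List.foldl_cons]
    have hstep : stepCnt (cntI (cntN l)) x = cntI (cntN (slotC x :: l)) := by
      unfold stepCnt
      rw [bridge_get _ _ _ (by rw [cntI_length, cntN_length]) hx1 hx2, cntI_getD,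
          bridge_set _ _ _ (by rw [cntI_length, cntN_length]) hx1 hx2]
      rw [cntN_cons, ← cntN_getD l _ hσ, cntI_set]
      push_cast
      rfl
    rw [hstep, ih (fun c hc => hb c (by simp [hc])) (slotC x :: l)]
    congr 1
    apply cntN_eq_of_count
    intro j
    simp only [slots, List.map_cons, List.count_append, List.count_cons]
    omega

theorem cntFold_all (cs : List Char) (hb : ∀ c ∈ cs, 71 ≤ c.toNat ∧ c.toNat ≤ 122) :
    cs.foldl stepCnt (List.replicate 26 (0 : Int)) = cntI (cntN (slots cs)) := by
  have h0 : List.replicate 26 (0 : Int) = cntI (cntN []) := by decide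
  rw [h0, cntFold cs hb []]
  simp

-- the initial denominator fold of Source B computes the product of count factorials
theorem denom_fold (n : ℕ) (g : List ℕ) (hb : ∀ c ∈ g, c ≤ n) (d : ℕ) :
    (cntI g).foldl (fun dd x => dd * PySem.List.pyGetD (factTbl n) x 0) ((d : ℕ) : Int)
      = (((d * denomF g : ℕ)) : Int) := by
  induction g generalizing d with
  | nil => simp [cntI, denomF]
  | cons c g ih =>
    simp only [cntI, List.map_cons, List.foldl_cons]
    rw [factTbl_getD n c (hb c (by simp)),
        show ((d : ℕ) : Int) * ((c.factorial : ℕ) : Int) = (((d * c.factorial : ℕ)) : Int) by push_cast; ring]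
    rw [show (g.map (Nat.cast)) = cntI g from rfl, ih (fun y hy => hb y (by simp [hy]))]
    rw [denomF_cons]
    push_cast
    ring

def stepB (fact : List Int) (st : Int × List Int × Int × Int) (c : Char) : Int × List Int × Int × Int :=
  let rank := st.1
  let cnt := st.2.1
  let denom := st.2.2.1
  let rem := st.2.2.2
  let i : Int := (c.toNat : Int) - 97
  let rank := rank + PySem.Int.floordiv ((PySem.List.slice cnt none (some i)).sum * PySem.List.pyGetD fact (rem - 1) 0) denom
  let denom := PySem.Int.floordiv denom (PySem.List.pyGetD fact (PySem.List.pyGetD cnt i 0) 0)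
  let cnt := PySem.List.pySetD cnt i (PySem.List.pyGetD cnt i 0 - 1)
  let denom := denom * PySem.List.pyGetD fact (PySem.List.pyGetD cnt i 0) 0
  let rem := rem - 1
  (rank, cnt, denom, rem)

theorem alt_eq (s : String) :
    makeStringSorted_alt s = PySem.Int.mod
      ((s.toList.foldl (stepB (factTbl s.toList.length))
        (0,
         s.toList.foldl stepCnt (List.replicate 26 (0 : Int)),
         (s.toList.foldl stepCnt (List.replicate 26 (0 : Int))).foldl
           (fun d x => d * PySem.List.pyGetD (factTbl s.toList.length) x 0) 1,
         ((s.toList.length : ℕ) : Int))).1) (10 ^ 9 + 7) := rfl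

theorem B_inv (n : ℕ) (rest : List Char) :
    (∀ c ∈ rest, 71 ≤ c.toNat ∧ c.toNat ≤ 122) → rest.length ≤ n →
    ∀ (r : ℕ),
    (rest.foldl (stepB (factTbl n))
        (((r : ℕ) : Int), cntI (cntN (slots rest)),
         ((denomF (cntN (slots rest)) : ℕ) : Int), ((rest.length : ℕ) : Int))).1
      = (((r + erank (slots rest) : ℕ)) : Int) := by
  induction rest with
  | nil =>
    intro _ _ r
    simp [slots, erank]
  | cons x rest ih =>
    intro hb hlen r
    obtain ⟨hx1, hx2⟩ := hb x (by simp)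
    have hbt : ∀ c ∈ rest, 71 ≤ c.toNat ∧ c.toNat ≤ 122 := fun c hc => hb c (by simp [hc])
    have hσ : slotC x < 26 := slotC_lt x hx1 hx2
    have hslotsb : ∀ y ∈ slots (x :: rest), y < 26 := by
      intro y hy
      rw [slots] at hy
      obtain ⟨c, hc, rfl⟩ := List.mem_map.mp hy
      obtain ⟨g1, g2⟩ := hb c hc
      exact slotC_lt c g1 g2
    set f := cntN (slots rest) with hf
    set g := cntN (slots (x :: rest)) with hg
    have hflen : f.length = 26 := cntN_length _
    have hglen : g.length = 26 := cntN_length _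
    have hcons : g = f.set (slotC x) (f.getD (slotC x) 0 + 1) := cntN_slots_cons x rest hx1 hx2
    have hgget : g.getD (slotC x) 0 = f.getD (slotC x) 0 + 1 := by
      rw [hcons]; exact getD_set_self f _ _ (by omega)
    have hgc1 : 1 ≤ g.getD (slotC x) 0 := by omega
    have hgsum : g.sum = rest.length + 1 := by
      have h5 := cntN_sum (slots (x :: rest)) hslotsb
      rw [← hg] at h5
      simp [slots] at h5
      omega
    have hset_back : g.set (slotC x) (g.getD (slotC x) 0 - 1) = f := by
      rw [hgget, hcons, List.set_set]
      simpa using set_getD_self f (slotC x) (by omega)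
    have hcbound : g.getD (slotC x) 0 ≤ n := by
      have h6 : g.getD (slotC x) 0 = (slots (x :: rest)).count (slotC x) := by
        rw [hg, cntN_getD _ _ hσ]
      have h7 : (slots (x :: rest)).count (slotC x) ≤ (slots (x :: rest)).length :=
        List.count_le_length
      have h8 : (slots (x :: rest)).length = rest.length + 1 := by simp [slots]
      simp only [List.length_cons] at hlen
      omega
    have hrlen : rest.length ≤ n := by simp only [List.length_cons] at hlen; omega
    simp only [List.foldl_cons]
    have hclen : (cntI g).length = 26 := by rw [cntI_length, hglen]
    -- slice and fact[rem-1]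
    have e5 : PySem.List.slice (cntI g) none (some ((x.toNat : Int) - 97)) = (cntI g).take (slotC x) :=
      bridge_slice _ _ hclen hx1 hx2
    have hrem1 : (((x :: rest).length : ℕ) : Int) - 1 = ((rest.length : ℕ) : Int) := by
      simp only [List.length_cons]; push_cast; ring
    have hsf := sless_fac g (slotC x)
    rw [hgsum, show rest.length + 1 - 1 = rest.length by omega] at hsf
    have hdivr : ((g.take (slotC x)).sum * rest.length.factorial) / denomF g = wsum g (slotC x) := by
      rw [hsf]
      exact Nat.mul_div_cancel_left _ (denomF_pos g)
    have erank_step : PySem.Int.floordiv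
        (((cntI g).take (slotC x)).sum * PySem.List.pyGetD (factTbl n) (((rest.length : ℕ)) : Int) 0)
        ((denomF g : ℕ) : Int) = ((wsum g (slotC x) : ℕ) : Int) := by
      rw [factTbl_getD n rest.length hrlen, cntI_take_sum,
          show (((g.take (slotC x)).sum : ℕ) : Int) * ((rest.length.factorial : ℕ) : Int)
            = ((((g.take (slotC x)).sum * rest.length.factorial : ℕ)) : Int) by push_cast; ring,
          PySem.Int.floordiv_natCast, hdivr]
    -- the count read, decrement, and denominator update
    have e3 : PySem.List.pyGetD (cntI g) ((x.toNat : Int) - 97) 0 = ((g.getD (slotC x) 0 : ℕ) : Int) := by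
      rw [bridge_get _ _ _ hclen hx1 hx2, cntI_getD]
    have hds := denomF_set g (slotC x) 0 (by omega)
    rw [Nat.factorial_zero, Nat.mul_one] at hds
    have hdiv0 : denomF g / (g.getD (slotC x) 0).factorial = denomF (g.set (slotC x) 0) := by
      rw [← hds]
      exact Nat.mul_div_cancel _ (Nat.factorial_pos _)
    have denom_step1 : PySem.Int.floordiv ((denomF g : ℕ) : Int)
        (PySem.List.pyGetD (factTbl n) (((g.getD (slotC x) 0 : ℕ)) : Int) 0)
        = ((denomF (g.set (slotC x) 0) : ℕ) : Int) := by
      rw [factTbl_getD n _ hcbound, PySem.Int.floordiv_natCast, hdiv0]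
    have hsub1 : ((g.getD (slotC x) 0 : ℕ) : Int) - 1 = (((g.getD (slotC x) 0 - 1 : ℕ)) : Int) := by
      omega
    have e2 : PySem.List.pySetD (cntI g) ((x.toNat : Int) - 97) (((g.getD (slotC x) 0 : ℕ) : Int) - 1) = cntI f := by
      rw [bridge_set _ _ _ hclen hx1 hx2, hsub1, ← cntI_set, hset_back]
    have e4 : PySem.List.pyGetD (cntI f) ((x.toNat : Int) - 97) 0 = ((f.getD (slotC x) 0 : ℕ) : Int) := by
      rw [bridge_get _ _ _ (by rw [cntI_length, hflen]) hx1 hx2, cntI_getD]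
    have hfget : f.getD (slotC x) 0 = g.getD (slotC x) 0 - 1 := by omega
    have hds2 := denomF_set (g.set (slotC x) 0) (slotC x) (g.getD (slotC x) 0 - 1) (by simp; omega)
    rw [getD_set_self g (slotC x) 0 (by omega), Nat.factorial_zero, Nat.mul_one,
        List.set_set, hset_back] at hds2
    have denom_step2 : ((denomF (g.set (slotC x) 0) : ℕ) : Int) *
        PySem.List.pyGetD (factTbl n) (((f.getD (slotC x) 0 : ℕ)) : Int) 0
        = ((denomF f : ℕ) : Int) := by
      rw [factTbl_getD n _ (by omega), hfget, hds2]
      push_cast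
      ring
    -- assemble the step
    simp only [stepB, e5, hrem1, erank_step, e3, denom_step1, e2, e4, denom_step2]
    have hrank : ((r : ℕ) : Int) + ((wsum g (slotC x) : ℕ) : Int) = (((r + wsum g (slotC x) : ℕ)) : Int) := by
      push_cast; ring
    rw [hrank, ih hbt hrlen (r + wsum g (slotC x))]
    have herank : erank (slots (x :: rest)) = wsum g (slotC x) + erank (slots rest) := by
      have h9 : erank (slots (x :: rest)) = wsum (cntN (slots (x :: rest))) (slotC x) + erank (slots rest) := by
        rw [slots_cons]; rfl
      rw [h9, ← hg]
    rw [herank]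
    push_cast
    ring

theorem alt_char (s : String) (hb : ∀ c ∈ s.toList, 71 ≤ c.toNat ∧ c.toNat ≤ 122) :
    makeStringSorted_alt s = (((erank (slots s.toList) % pvP : ℕ)) : Int) := by
  rw [alt_eq, cntFold_all s.toList hb]
  have hcnts : ∀ c ∈ cntN (slots s.toList), c ≤ s.toList.length := by
    intro c hc
    rw [cntN] at hc
    obtain ⟨j, _, rfl⟩ := List.mem_map.mp hc
    calc (slots s.toList).count j ≤ (slots s.toList).length := List.count_le_length
      _ = s.toList.length := by simp [slots]
  have hden := denom_fold s.toList.length (cntN (slots s.toList)) hcnts 1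
  simp only [Nat.cast_one, one_mul] at hden
  rw [hden]
  have hB := B_inv s.toList.length s.toList hb le_rfl 0
  simp only [Nat.cast_zero, zero_add] at hB
  rw [show ((0 : Int)) = (((0 : ℕ)) : Int) by norm_num] at hB ⊢
  rw [hB, hMODcast, PySem.Int.mod_natCast]

-- ===== VERDICT (by name: the statement is the Claim_ definition above) =====
theorem makeStringSorted_spec : Claim_equal_makeStringSorted := by
  intro s _hdom hpre
  have hb : ∀ c ∈ s.toList, 71 ≤ c.toNat ∧ c.toNat ≤ 122 := by
    have h0 := hpre
    unfold Pre_makeStringSorted at h0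
    simp only [List.all_eq_true, Bool.and_eq_true, decide_eq_true_eq] at h0
    exact h0
  unfold Spec_makeStringSorted
  rw [A_char s hb, alt_char s hb]
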